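-- pv_equiv track=rewrite | github.com/NguyenHuuThuat/Codesignal-with-Python | matrixElementsSum.py | solution
-- ===== SOURCE A (Python) =====
-- def solution(matrix):
--     row = len(matrix)
--     col = len(matrix[0])
--     # b = matrix.shape
--     sum = 0
--
--     for i in range(0, row):
--         for j in range(0, col):
--             if matrix[i][j] == 0:
--                 if i < row -1:
--                     matrix[i+1][j] = 0
--             else:
--                 sum += matrix[i][j]
--     return sum
-- ===== SOURCE B (Python) =====
-- def solution(matrix):
--     # Column-major with early break at the first zero; pure (does not mutate
--     # the argument, unlike A; equivalence is about the return value).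
--     col = len(matrix[0])
--     total = 0
--     for j in range(col):
--         for row in matrix:
--             if row[j] == 0:
--                 break
--             total += row[j]
--     return total
-- ===== Notes on version B (the rewrite author's own statement) =====
-- stated objective: alternative
-- what changed: Replaces A's row-major sweep that propagates zeros by mutating the matrix with a pure column-major scan that sums each column down to its first zero and breaks there.
import Mathlib
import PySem

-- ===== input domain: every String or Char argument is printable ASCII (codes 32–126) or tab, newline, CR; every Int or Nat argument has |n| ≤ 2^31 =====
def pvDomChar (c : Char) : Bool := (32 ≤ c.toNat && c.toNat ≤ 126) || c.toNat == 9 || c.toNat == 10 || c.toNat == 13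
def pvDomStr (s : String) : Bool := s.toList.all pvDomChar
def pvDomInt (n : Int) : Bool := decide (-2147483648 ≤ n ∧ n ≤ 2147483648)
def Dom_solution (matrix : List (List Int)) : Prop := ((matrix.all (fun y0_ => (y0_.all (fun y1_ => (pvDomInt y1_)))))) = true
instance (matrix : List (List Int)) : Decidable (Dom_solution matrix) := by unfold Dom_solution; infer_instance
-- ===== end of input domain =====

-- B replaces A's row-major sweep (which propagates zeros by mutating the matrix)
-- with a pure column-major scan that sums each column down to its first zero and
-- breaks there. A mutates its argument; B does not: the equivalence proved here
-- is about the return value only.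

-- ===== PORT A =====
-- inner `for j in range(0, col)` body; state is (matrix, sum).
-- Reads/writes use List.getD/List.set; Pre_solution guarantees every Python
-- access is in range (Python raises IndexError otherwise).
def solInnerStep (row : Nat) (i : Nat) (st : List (List Int) × Int) (j : Nat) :
    List (List Int) × Int :=
  if (st.1.getD i []).getD j 0 = 0 then
    if i < row - 1 then (st.1.set (i+1) ((st.1.getD (i+1) []).set j 0), st.2) else st
  else (st.1, st.2 + (st.1.getD i []).getD j 0)

def solOuterStep (row col : Nat) (st : List (List Int) × Int) (i : Nat) :
    List (List Int) × Int :=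
  (List.range col).foldl (solInnerStep row i) st

def solution (matrix : List (List Int)) : Int :=
  let row := matrix.length
  let col := (matrix.getD 0 []).length  -- Python: len(matrix[0]), raises on []; excluded by Pre_
  ((List.range row).foldl (solOuterStep row col) (matrix, 0)).2

-- ===== PORT B =====
-- `for row in matrix: if row[j] == 0: break / total += row[j]`
def colSum (rows : List (List Int)) (j : Nat) : Int :=
  match rows with
  | [] => 0
  | r :: rs => if r.getD j 0 = 0 then 0 else r.getD j 0 + colSum rs j

def solution_alt (matrix : List (List Int)) : Int :=
  let col := (matrix.getD 0 []).length
  (List.range col).foldl (fun total j => total + colSum matrix j) 0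

-- ===== PRECONDITION & SPEC =====
-- Pre_ excludes exactly the inputs on which Python A raises IndexError:
-- the empty matrix (len(matrix[0])) and matrices with a row shorter than row 0.
def Pre_solution (matrix : List (List Int)) : Prop :=
  matrix ≠ [] ∧ ∀ r ∈ matrix, (matrix.getD 0 []).length ≤ r.length
instance (matrix : List (List Int)) : Decidable (Pre_solution matrix) := by
  unfold Pre_solution; infer_instance

def pvWitness_solution : List (List Int) := [[1, 2], [0, 3]]

def Spec_solution (matrix : List (List Int)) (out : Int) : Prop := out = solution_alt matrix
instance (matrix : List (List Int)) (out : Int) : Decidable (Spec_solution matrix out) := by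
  unfold Spec_solution; infer_instance

-- ===== CLAIM (what is proved, stated in full; the proofs are below) =====
def Claim_equal_solution : Prop :=
  ∀ (matrix : List (List Int)), Dom_solution matrix → Pre_solution matrix →
    Spec_solution matrix (solution matrix)

-- ===== LEMMAS AND PROOFS =====

-- the merged next row after A processes a row r0 over columns < col
def zmerge (col : Nat) (r0 h : List Int) : List Int :=
  (List.range col).foldl (fun h j => if r0.getD j 0 = 0 then h.set j 0 else h) h

-- sum of the non-zero entries of r0 over columns < col, added onto s
def rowNZ (col : Nat) (r0 : List Int) (s : Int) : Int :=
  (List.range col).foldl (fun s j => if r0.getD j 0 = 0 then s else s + r0.getD j 0) s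

lemma getD_set_zero (l : List Int) (i j : Nat) :
    (l.set i 0).getD j 0 = if i = j then 0 else l.getD j 0 := by
  rw [List.getD_eq_getElem?_getD, List.getElem?_set]
  by_cases h : i = j
  · subst h
    by_cases hl : i < l.length
    · simp [hl]
    · rw [if_pos rfl, if_neg hl, List.getD_eq_getElem?_getD,
        List.getElem?_eq_none (by omega : l.length ≤ i)]
      simp
  · simp [h, List.getD_eq_getElem?_getD]

lemma zmerge_succ (n : Nat) (r0 h : List Int) :
    zmerge (n+1) r0 h =
      if r0.getD n 0 = 0 then (zmerge n r0 h).set n 0 else zmerge n r0 h := by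
  simp [zmerge, List.range_succ]

lemma rowNZ_succ (n : Nat) (r0 : List Int) (s : Int) :
    rowNZ (n+1) r0 s =
      if r0.getD n 0 = 0 then rowNZ n r0 s else rowNZ n r0 s + r0.getD n 0 := by
  simp [rowNZ, List.range_succ]

lemma solOuterStep_succ (row col i : Nat) (st : List (List Int) × Int) :
    solOuterStep row (col+1) st i = solInnerStep row i (solOuterStep row col st i) col := by
  simp [solOuterStep, List.range_succ]

lemma zmerge_getD (col : Nat) (r0 h : List Int) (j : Nat) :
    (zmerge col r0 h).getD j 0 =
      if j < col ∧ r0.getD j 0 = 0 then 0 else h.getD j 0 := by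
  induction col with
  | zero => simp [zmerge]
  | succ n ih =>
      rw [zmerge_succ]
      by_cases hz : r0.getD n 0 = 0
      · rw [if_pos hz, getD_set_zero, ih]
        rcases eq_or_ne n j with hj | hj
        · subst hj
          rw [if_pos rfl, if_pos ⟨by omega, hz⟩]
        · rw [if_neg hj]
          by_cases hc : j < n ∧ r0.getD j 0 = 0
          · rw [if_pos hc, if_pos ⟨by omega, hc.2⟩]
          · rw [if_neg hc, if_neg (by rintro ⟨h1, h2⟩; exact hc ⟨by omega, h2⟩)]
      · rw [if_neg hz, ih]
        by_cases hc : j < n ∧ r0.getD j 0 = 0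
        · rw [if_pos hc, if_pos ⟨by omega, hc.2⟩]
        · rw [if_neg hc, if_neg ?_]
          rintro ⟨h1, h2⟩
          rcases Nat.lt_succ_iff_lt_or_eq.mp h1 with h | h
          · exact hc ⟨h, h2⟩
          · exact hz (h ▸ h2)

-- L1: the first outer step (i = 0) sums the non-zero entries of r0 and zeroes
-- the next row under r0's zeros
lemma outer_step_zero (col : Nat) (r0 : List Int) (rest : List (List Int)) (s : Int) :
    solOuterStep (rest.length + 1) col (r0 :: rest, s) 0 =
      (r0 :: (match rest with
              | [] => ([] : List (List Int))
              | h :: t => zmerge col r0 h :: t), rowNZ col r0 s) := by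
  induction col with
  | zero =>
      cases rest <;> simp [solOuterStep, rowNZ, zmerge]
  | succ n ih =>
      rw [solOuterStep_succ, ih, rowNZ_succ]
      cases rest with
      | nil => simp [solInnerStep]; split_ifs <;> simp
      | cons h t =>
          simp only [solInnerStep, zmerge_succ, List.getD_cons_zero, List.getD_cons_succ,
            List.set_cons_succ, List.set_cons_zero, List.length_cons,
            show (0 < t.length + 1 + 1 - 1) = True from by simp, if_true]
          split_ifs <;> rfl

-- cons-shift for the inner fold: processing row i+1 of r :: m is processing row i of m
lemma inner_cons (l : List Nat) (r : List Int) (m : List (List Int)) (s : Int)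
    (row i : Nat) :
    l.foldl (solInnerStep (row + 1) (i + 1)) (r :: m, s) =
      (r :: (l.foldl (solInnerStep row i) (m, s)).1,
        (l.foldl (solInnerStep row i) (m, s)).2) := by
  induction l generalizing m s with
  | nil => simp
  | cons a l ih =>
      have hstep : solInnerStep (row + 1) (i + 1) (r :: m, s) a =
          (r :: (solInnerStep row i (m, s) a).1, (solInnerStep row i (m, s) a).2) := by
        unfold solInnerStep
        simp only [List.getD_cons_succ, List.set_cons_succ,
          show (i + 1 < row + 1 - 1) = (i < row - 1) from by
            simp only [eq_iff_iff]; omega]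
        split_ifs <;> rfl
      rw [List.foldl_cons, List.foldl_cons, hstep, ih]

-- cons-shift for the outer fold over shifted indices
lemma outer_cons (l : List Nat) (r : List Int) (m : List (List Int)) (s : Int)
    (col row : Nat) :
    (l.map Nat.succ).foldl (solOuterStep (row + 1) col) (r :: m, s) =
      (r :: (l.foldl (solOuterStep row col) (m, s)).1,
        (l.foldl (solOuterStep row col) (m, s)).2) := by
  induction l generalizing m s with
  | nil => simp
  | cons a l ih =>
      have hstep : solOuterStep (row + 1) col (r :: m, s) (Nat.succ a) =
          (r :: (solOuterStep row col (m, s) a).1, (solOuterStep row col (m, s) a).2) := by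
        simpa [solOuterStep, Nat.succ_eq_add_one] using
          inner_cons (List.range col) r m s row a
      rw [List.map_cons, List.foldl_cons, List.foldl_cons, hstep, ih]

lemma foldl_add_sum (l : List Nat) (f : Nat → Int) (s : Int) :
    l.foldl (fun t j => t + f j) s = s + (l.map f).sum := by
  induction l generalizing s with
  | nil => simp
  | cons a l ih => simp [ih]; ring

lemma sum_map_add (l : List Nat) (f g : Nat → Int) :
    (l.map f).sum + (l.map g).sum = (l.map (fun x => f x + g x)).sum := by
  induction l with
  | nil => simp
  | cons a l ih => simp [← ih]; ring

lemma rowNZ_eq (col : Nat) (r0 : List Int) (s : Int) :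
    rowNZ col r0 s =
      s + ((List.range col).map
            (fun j => if r0.getD j 0 = 0 then 0 else r0.getD j 0)).sum := by
  induction col with
  | zero => simp [rowNZ]
  | succ n ih =>
      rw [rowNZ_succ, ih, List.range_succ, List.map_append, List.sum_append]
      simp only [List.map_cons, List.map_nil, List.sum_cons, List.sum_nil]
      split_ifs <;> ring

-- main induction over the rows
lemma main_lemma (n : Nat) (mat : List (List Int)) (col : Nat) (s : Int)
    (hn : mat.length = n) :
    ((List.range n).foldl (solOuterStep n col) (mat, s)).2 =
      (List.range col).foldl (fun t j => t + colSum mat j) s := by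
  induction n generalizing mat s with
  | zero =>
      have : mat = [] := List.length_eq_zero_iff.mp hn
      subst this
      rw [foldl_add_sum]
      simp [colSum]
  | succ k ih =>
      cases mat with
      | nil => simp at hn
      | cons r0 rest =>
          have hrest : rest.length = k := by simpa using hn
          rw [List.range_succ_eq_map, List.foldl_cons]
          cases rest with
          | nil =>
              have hk : k = 0 := by simpa using hrest.symm
              subst hk
              have h0 := outer_step_zero col r0 [] s
              simp only [List.length_nil] at h0
              rw [h0, outer_cons, ih [] (rowNZ col r0 s) rfl]
              rw [foldl_add_sum, foldl_add_sum, rowNZ_eq]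
              simp [colSum]
          | cons h t =>
              have h0 := outer_step_zero col r0 (h :: t) s
              rw [hrest] at h0
              rw [h0, outer_cons,
                ih (zmerge col r0 h :: t) (rowNZ col r0 s) (by simpa using hrest)]
              rw [foldl_add_sum, rowNZ_eq, add_assoc, sum_map_add, foldl_add_sum]
              congr 1
              refine congrArg List.sum (List.map_congr_left ?_)
              intro j hj
              have hjcol : j < col := List.mem_range.mp hj
              simp only [colSum]
              by_cases hz : r0.getD j 0 = 0
              · rw [if_pos hz, zmerge_getD,
                  if_pos (show j < col ∧ r0.getD j 0 = 0 from ⟨hjcol, hz⟩), if_pos hz]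
                simp
              · rw [if_neg hz, zmerge_getD,
                  if_neg (show ¬(j < col ∧ r0.getD j 0 = 0) from fun hc => hz hc.2),
                  if_neg hz]

-- ===== VERDICT (by name: the statement is the Claim_ definition above) =====
theorem solution_spec : Claim_equal_solution := by
  intro matrix _ _
  unfold Spec_solution solution solution_alt
  exact main_lemma matrix.length matrix _ 0 rfl
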